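-- pv_equiv track=rewrite | github.com/m0ksem/python-topic-1 | tests/python/tests/binary-search-prebuild.py | make_tetradic_numbers
-- ===== SOURCE A (Python) =====
-- def make_tetradic_number(index: int) -> int:
--   return (index * (index + 1) * (index + 2)) // 6
--
-- def make_tetradic_numbers(num: int) -> list[int]:
--   numbers = []
--   index = 0
--
--   while True:
--     tetradic_number = make_tetradic_number(index)
--     if tetradic_number > num:
--       break
--
--     numbers.append(tetradic_number)
--     index += 1
--
--   return numbers
-- ===== SOURCE B (Python) =====
-- def make_tetradic_number(index: int) -> int:
--   return (index * (index + 1) * (index + 2)) // 6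
--
-- def make_tetradic_numbers(num: int) -> list[int]:
--   # Binary search for the largest index lo with T(lo) <= num, then map over range.
--   if num < 0:
--     return []
--   hi = 1
--   while make_tetradic_number(hi) <= num:
--     hi *= 2
--   lo = 0  # invariant: T(lo) <= num < T(hi)
--   while hi - lo > 1:
--     mid = (lo + hi) // 2
--     if make_tetradic_number(mid) <= num:
--       lo = mid
--     else:
--       hi = mid
--   return [make_tetradic_number(i) for i in range(lo + 1)]
-- ===== Notes on version B (the rewrite author's own statement) =====
-- stated objective: alternative
-- what changed: Replaces A's grow-until-break append loop with a doubling + binary search for the largest index whose tetrahedral number is <= num, then a single map over a fixed range.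
import Mathlib
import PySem

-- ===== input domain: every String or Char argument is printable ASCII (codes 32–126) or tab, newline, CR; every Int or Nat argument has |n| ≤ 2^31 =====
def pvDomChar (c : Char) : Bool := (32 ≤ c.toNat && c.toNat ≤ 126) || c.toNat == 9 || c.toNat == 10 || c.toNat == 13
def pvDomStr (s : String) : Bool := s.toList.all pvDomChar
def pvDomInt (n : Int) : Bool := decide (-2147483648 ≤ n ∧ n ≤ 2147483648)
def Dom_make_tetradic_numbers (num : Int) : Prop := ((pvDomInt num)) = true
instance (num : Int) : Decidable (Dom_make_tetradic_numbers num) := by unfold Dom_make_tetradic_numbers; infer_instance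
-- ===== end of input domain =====

-- B replaces A's grow-until-break append loop with a doubling + binary search for the
-- largest index with T(index) ≤ num, then a single map over range; same results, proved equal.

-- ===== PORT A =====
def make_tetradic_number (index : Int) : Int :=
  PySem.Int.floordiv (index * (index + 1) * (index + 2)) 6

-- termination helper for both loops: T(i) ≥ i for natural i
theorem tetradic_ge_self (i : Nat) : (i : Int) ≤ make_tetradic_number i := by
  unfold make_tetradic_number
  rw [PySem.Int.floordiv_eq_ediv_of_pos (by omega)]
  rw [Int.le_ediv_iff_mul_le (by omega : (0:Int) < 6)]
  have h0 : (0:Int) ≤ (i:Int) := Int.natCast_nonneg i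
  have h1 : (0:Int) ≤ (i:Int) * ((i:Int) - 1) := by
    rcases Nat.eq_zero_or_pos i with h | h
    · simp [h]
    · have : (1:Int) ≤ (i:Int) := by exact_mod_cast h
      nlinarith
  nlinarith [mul_nonneg h1 (by linarith : (0:Int) ≤ (i:Int) + 4)]

-- the 'while True' loop of A (index starts at 0 and only increments, so a Nat counter)
def aLoop (num : Int) (numbers : List Int) (index : Nat) : List Int :=
  let tetradic_number := make_tetradic_number index
  if tetradic_number > num then numbers
  else aLoop num (numbers ++ [tetradic_number]) (index + 1)
termination_by (num + 1 - index).toNat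
decreasing_by
  have h := tetradic_ge_self index
  simp only [not_lt] at *
  omega

def make_tetradic_numbers (num : Int) : List Int :=
  aLoop num [] 0

-- ===== PORT B =====
-- 'while make_tetradic_number(hi) <= num: hi *= 2'  (hi starts at 1, stays ≥ 1)
def bGrow (num : Int) (hi : Nat) (hpos : 1 ≤ hi) : Nat :=
  if make_tetradic_number hi ≤ num then bGrow num (hi * 2) (by omega) else hi
termination_by (num + 1 - hi).toNat
decreasing_by
  have h := tetradic_ge_self hi
  omega

-- 'while hi - lo > 1: …'  binary search keeping T(lo) ≤ num < T(hi)
def bSearch (num : Int) (lo hi : Nat) : Nat :=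
  if hi - lo > 1 then
    let mid := (lo + hi) / 2
    if make_tetradic_number mid ≤ num then bSearch num mid hi
    else bSearch num lo mid
  else lo
termination_by hi - lo
decreasing_by all_goals omega

def make_tetradic_numbers_alt (num : Int) : List Int :=
  if num < 0 then []
  else
    let hi := bGrow num 1 (by omega)
    let lo := bSearch num 0 hi
    (List.range (lo + 1)).map (fun i => make_tetradic_number i)

-- ===== PRECONDITION & SPEC =====
def Spec_make_tetradic_numbers (num : Int) (out : List Int) : Prop := out = make_tetradic_numbers_alt num
instance (num : Int) (out : List Int) : Decidable (Spec_make_tetradic_numbers num out) := by unfold Spec_make_tetradic_numbers; infer_instance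

-- ===== CLAIM (what is proved, stated in full; the proofs are below) =====
def Claim_equal_make_tetradic_numbers : Prop := ∀ (num : Int), Dom_make_tetradic_numbers num → Spec_make_tetradic_numbers num (make_tetradic_numbers num)

-- ===== LEMMAS AND PROOFS =====

theorem tetradic_mono {i j : Nat} (h : i ≤ j) :
    make_tetradic_number i ≤ make_tetradic_number j := by
  unfold make_tetradic_number
  rw [PySem.Int.floordiv_eq_ediv_of_pos (by omega), PySem.Int.floordiv_eq_ediv_of_pos (by omega)]
  apply Int.ediv_le_ediv (by omega)
  have hij : (i : Int) ≤ (j : Int) := by exact_mod_cast h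
  have h0 : (0:Int) ≤ (i:Int) := Int.natCast_nonneg i
  gcongr

theorem bGrow_spec (num : Int) (hi : Nat) (hpos : 1 ≤ hi) :
    1 ≤ bGrow num hi hpos ∧ ¬ make_tetradic_number (bGrow num hi hpos) ≤ num := by
  fun_induction bGrow with
  | case1 hi hpos ht ih => exact ih
  | case2 hi hpos ht => exact ⟨hpos, ht⟩

theorem bSearch_spec (num : Int) (lo hi : Nat)
    (hlo : make_tetradic_number lo ≤ num) (hhi : ¬ make_tetradic_number hi ≤ num)
    (hlt : lo < hi) :
    make_tetradic_number (bSearch num lo hi) ≤ num ∧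
      ¬ make_tetradic_number (bSearch num lo hi + 1) ≤ num := by
  fun_induction bSearch with
  | case1 lo hi hgt mid hmid ih => exact ih hmid hhi (by omega)
  | case2 lo hi hgt mid hmid ih => exact ih hlo hmid (by omega)
  | case3 lo hi hgt =>
    have : hi = lo + 1 := by omega
    subst this
    exact ⟨hlo, hhi⟩

-- the while-loop of A, characterized by the cut index n: T(n) ≤ num < T(n+1)
theorem aLoop_eq (num : Int) (n : Nat)
    (hn : make_tetradic_number n ≤ num) (hn1 : ¬ make_tetradic_number (n + 1) ≤ num) :
    ∀ (index : Nat) (acc : List Int), index ≤ n + 1 →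
      aLoop num acc index =
        acc ++ (List.range' index (n + 1 - index)).map (fun i => make_tetradic_number i) := by
  have hn1' : ¬ make_tetradic_number ((n + 1 : Nat) : Int) ≤ num := by push_cast; exact hn1
  intro index
  induction hk : n + 1 - index generalizing index with
  | zero =>
    intro acc hle
    have hidx : index = n + 1 := by omega
    subst hidx
    rw [aLoop]
    rw [if_pos (not_le.mp hn1')]
    simp
  | succ k ih =>
    intro acc hle
    have hix : index ≤ n := by omega
    have hle' : make_tetradic_number index ≤ num := le_trans (tetradic_mono hix) hn
    rw [aLoop]
    rw [if_neg (not_lt.mpr hle')]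
    rw [ih (index + 1) (by omega) (acc ++ [make_tetradic_number index]) (by omega)]
    rw [List.range'_succ]
    simp

theorem make_tetradic_numbers_eq (num : Int) :
    make_tetradic_numbers num = make_tetradic_numbers_alt num := by
  unfold make_tetradic_numbers make_tetradic_numbers_alt
  by_cases hneg : num < 0
  · rw [if_pos hneg, aLoop]
    have h0 : make_tetradic_number 0 = 0 := by decide
    simp only [Nat.cast_zero, h0]
    rw [if_pos (by omega)]
  · rw [if_neg hneg]
    have h0 : make_tetradic_number 0 ≤ num := by
      have : make_tetradic_number 0 = 0 := by decide
      omega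
    obtain ⟨hg1, hg2⟩ := bGrow_spec num 1 (by omega)
    obtain ⟨hs1, hs2⟩ := bSearch_spec num 0 (bGrow num 1 (by omega)) h0 hg2
      (by
        rcases Nat.lt_or_ge 0 (bGrow num 1 (by omega)) with h | h
        · exact h
        · omega)
    rw [aLoop_eq num (bSearch num 0 (bGrow num 1 (by omega))) hs1 hs2 0 [] (by omega)]
    simp [List.range_eq_range']

-- ===== VERDICT (by name: the statement is the Claim_ definition above) =====
theorem make_tetradic_numbers_spec : Claim_equal_make_tetradic_numbers := by
  intro num _
  unfold Spec_make_tetradic_numbers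
  exact make_tetradic_numbers_eq num
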